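-- pv_equiv track=rewrite | github.com/LJatLIM/BrAinPI | BrAinPI/tiff_loader.py | axes_pos_extract
-- ===== SOURCE A (Python) =====
-- def axes_pos_extract(axes):
--     """
--     Extract the positions of axes from their labels.
--
--     Args:
--         axes (str): String representing axis labels.
--
--     Returns:
--         dict: Mapping of axis labels to their positions.
--     """
--     dic = {
--         "T": None,
--         "C": None,
--         "Z": None,
--         "Y": None,
--         "X": None,
--     }
--     if axes.endswith("S"):
--         dic["S"] = None
--     characters = list(axes)
--     # logger.info("Axis characters:", characters)
--     for index, char in enumerate(characters):
--         if char in dic: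
--             dic[char] = index
--     return dic
-- ===== SOURCE B (Python) =====
-- def _pos(axes, label):
--     i = axes.rfind(label)
--     return None if i < 0 else i
--
--
-- def axes_pos_extract(axes):
--     labels = ["T", "C", "Z", "Y", "X", "S"] if axes.endswith("S") else ["T", "C", "Z", "Y", "X"]
--     return {L: _pos(axes, L) for L in labels}
-- ===== Notes on version B (the rewrite author's own statement) =====
-- stated objective: idiomatic
-- what changed: Replaces the prepopulated None-dict plus one Python-level left-to-right distributing pass over enumerate(axes) with a dict comprehension computing each fixed label's position by a per-key axes.rfind (last occurrence = the loop's overwrite semantics), -1 mapped to None.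
import Mathlib
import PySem

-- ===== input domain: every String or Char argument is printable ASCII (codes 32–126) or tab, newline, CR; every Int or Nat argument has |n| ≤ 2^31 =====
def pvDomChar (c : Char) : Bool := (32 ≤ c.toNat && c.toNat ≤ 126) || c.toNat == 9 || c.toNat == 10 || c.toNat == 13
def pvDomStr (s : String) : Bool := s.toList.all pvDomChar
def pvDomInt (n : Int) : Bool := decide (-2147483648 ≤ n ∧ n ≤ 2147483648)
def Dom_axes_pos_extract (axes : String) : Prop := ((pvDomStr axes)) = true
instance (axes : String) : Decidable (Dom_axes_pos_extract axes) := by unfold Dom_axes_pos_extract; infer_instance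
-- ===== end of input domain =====

-- B builds the label→position list directly from per-label rfind searches (last occurrence; -1 ↦ none)
-- instead of A's prepopulated None-dict updated by one distributing pass over enumerate(axes); objective: idiomatic.


-- ===== PORT A =====
-- one step of A's loop: 'if char in dic: dic[char] = index'  (char is the 1-char string of p.2)
def axesStepA (d : PySem.Dict String (Option Int)) (p : Int × Char) : PySem.Dict String (Option Int) :=
  if d.contains (String.ofList [p.2]) then d.insert (String.ofList [p.2]) (some p.1) else d

def axes_pos_extract (axes : String) : List (String × Option Int) :=
  let dic : PySem.Dict String (Option Int) :=
    PySem.Dict.ofList [("T", none), ("C", none), ("Z", none), ("Y", none), ("X", none)]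
  let dic := if PySem.Str.endswith axes "S" then dic.insert "S" none else dic
  let characters := axes.toList
  let dic := (PySem.List.enumerate characters).foldl axesStepA dic
  dic.items

-- ===== PORT B =====
-- _pos(axes, label) of Source B
def axesPosB (axes : String) (label : String) : Option Int :=
  let i := PySem.Str.rfind axes label
  if i < 0 then none else some i

def axes_pos_extract_alt (axes : String) : List (String × Option Int) :=
  let labels := if PySem.Str.endswith axes "S" then ["T", "C", "Z", "Y", "X", "S"]
                else ["T", "C", "Z", "Y", "X"]
  labels.map (fun L => (L, axesPosB axes L))

-- ===== PRECONDITION & SPEC =====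
def Spec_axes_pos_extract (axes : String) (out : List (String × Option Int)) : Prop := out = axes_pos_extract_alt axes
instance (axes : String) (out : List (String × Option Int)) : Decidable (Spec_axes_pos_extract axes out) := by unfold Spec_axes_pos_extract; infer_instance

-- ===== CLAIM (what is proved, stated in full; the proofs are below) =====
def Claim_equal_axes_pos_extract : Prop := ∀ (axes : String), Dom_axes_pos_extract axes → Spec_axes_pos_extract axes (axes_pos_extract axes)

-- ===== LEMMAS AND PROOFS =====

-- the value update that A's loop applies to the entry of key k, per (index, char) pair
def updF (k : String) (acc : Option Int) (q : Int × Char) : Option Int :=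
  if String.ofList [q.2] == k then some q.1 else acc

-- A's loop rewrites each entry of the dict independently, in key order
theorem foldl_items (l : List (Int × Char)) :
    ∀ (items : List (String × Option Int)),
      (l.foldl axesStepA (PySem.Dict.mk items)).items
        = items.map (fun p => (p.1, l.foldl (updF p.1) p.2)) := by
  induction l with
  | nil => intro items; simp
  | cons q l ih =>
    intro items
    obtain ⟨i, c⟩ := q
    simp only [List.foldl_cons]
    by_cases h : (PySem.Dict.mk items).contains (String.ofList [c]) = true
    · have hins : axesStepA (PySem.Dict.mk items) (i, c)
          = PySem.Dict.mk (items.map (fun p => if p.1 == String.ofList [c] then (String.ofList [c], some i) else p)) := by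
        simp [axesStepA, PySem.Dict.insert, h]
      rw [hins, ih, List.map_map]
      apply List.map_congr_left
      intro p _
      by_cases hp : p.1 == String.ofList [c]
      · have : p.1 = String.ofList [c] := by exact beq_iff_eq.mp hp
        simp [Function.comp, updF, ← this]
      · simp only [Function.comp, hp, if_false, Bool.false_eq_true, updF]
        rw [if_neg (fun hc => hp (beq_iff_eq.mpr (beq_iff_eq.mp hc).symm))]
    · have hstep : axesStepA (PySem.Dict.mk items) (i, c) = PySem.Dict.mk items := by
        simp [axesStepA, h]
      rw [hstep, ih]
      apply List.map_congr_left
      intro p hp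
      have hne : ¬ (String.ofList [c] = p.1) := by
        intro hc
        apply h
        simp only [PySem.Dict.contains, List.any_eq_true]
        exact ⟨p, hp, by simp [hc]⟩
      simp only [updF]
      rw [if_neg (by simpa using hne)]

theorem isPrefixOf_single (c : Char) (l : List Char) :
    [c].isPrefixOf l = true ↔ l[0]? = some c := by
  cases l with
  | nil => simp [List.isPrefixOf]
  | cons a t => simp only [List.isPrefixOf, Bool.and_true, beq_iff_eq, List.getElem?_cons_zero, Option.some.injEq]; exact eq_comm

-- appending one char does not change rfind.go below the old length
theorem go_lt (cs : List Char) (x c : Char) :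
    ∀ j, j < cs.length →
      PySem.Chars.rfind.go (cs ++ [x]) [c] j = PySem.Chars.rfind.go cs [c] j := by
  intro j
  induction j with
  | zero =>
    intro hj
    simp only [PySem.Chars.rfind.go]
    have : [c].isPrefixOf (cs ++ [x]) = [c].isPrefixOf cs := by
      obtain ⟨h, t⟩ := cs
      · simp at hj
      · simp [List.isPrefixOf]
    rw [this]
  | succ j ih =>
    intro hj
    simp only [PySem.Chars.rfind.go]
    have hdrop : (cs ++ [x]).drop (j + 1) = cs.drop (j + 1) ++ [x] :=
      List.drop_append_of_le_length (by omega)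
    have : [c].isPrefixOf ((cs ++ [x]).drop (j + 1)) = [c].isPrefixOf (cs.drop (j + 1)) := by
      rw [hdrop]
      rcases hcs : cs.drop (j+1) with _ | ⟨h, t⟩
      · exfalso
        have hlf := congrArg List.length hcs
        simp at hlf
        omega
      · simp [List.isPrefixOf]
    rw [this, ih (by omega)]

theorem go_zero (s sub : List Char) :
    PySem.Chars.rfind.go s sub 0 = if sub.isPrefixOf s = true then 0 else -1 := by
  rw [PySem.Chars.rfind.go]

theorem go_succ (s sub : List Char) (j : Nat) :
    PySem.Chars.rfind.go s sub (j + 1)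
      = if sub.isPrefixOf (s.drop (j + 1)) = true then (((j + 1 : Nat)) : Int)
        else PySem.Chars.rfind.go s sub j := by
  rw [PySem.Chars.rfind.go]

-- single-char rfind, one char appended: hit at the end or the old answer
theorem rfind_append_char (cs : List Char) (x c : Char) :
    PySem.Chars.rfind (cs ++ [x]) [c]
      = if x = c then (cs.length : Int) else PySem.Chars.rfind cs [c] := by
  unfold PySem.Chars.rfind
  have hlen : (cs ++ [x]).length = cs.length + 1 := by simp
  rw [hlen, go_succ]
  have hd1 : (cs ++ [x]).drop (cs.length + 1) = [] := List.drop_eq_nil_of_le (by simp)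
  rw [hd1]
  simp only [show ([c].isPrefixOf ([] : List Char)) = false from rfl, Bool.false_eq_true,
    if_false]
  have h1 : ([c].isPrefixOf [x] = true) ↔ x = c := by
    rw [isPrefixOf_single]; simp
  cases cs with
  | nil =>
    simp only [List.nil_append, List.length_nil, Nat.cast_zero]
    rw [go_zero, go_zero]
    by_cases hxc : x = c
    · rw [if_pos (h1.mpr hxc), if_pos hxc]
    · rw [if_neg (fun hh => hxc (h1.mp hh)), if_neg hxc,
        if_neg (by simp [List.isPrefixOf])]
  | cons hh tt =>
    simp only [List.length_cons]
    rw [go_succ]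
    have hdx : ((hh :: tt) ++ [x]).drop (tt.length + 1) = [x] := by
      rw [List.drop_append_of_le_length (by simp)]
      simp
    rw [hdx]
    by_cases hxc : x = c
    · rw [if_pos (h1.mpr hxc), if_pos hxc]
    · rw [if_neg (fun hh2 => hxc (h1.mp hh2)), if_neg hxc]
      conv_rhs => rw [go_succ]
      rw [List.drop_eq_nil_of_le (by simp),
        if_neg (by simp [List.isPrefixOf])]
      exact go_lt (hh :: tt) x c tt.length (by simp)

-- A's per-key overwrite fold computes exactly rfind of that character
theorem upd_rfind (c : Char) (cs : List Char) :
    (PySem.List.enumerate cs 0).foldl (updF (String.ofList [c])) none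
      = (if PySem.Chars.rfind cs [c] < 0 then none
         else some (PySem.Chars.rfind cs [c])) := by
  induction cs using List.reverseRecOn with
  | nil =>
    have h0 : PySem.Chars.rfind [] [c] = -1 := by
      unfold PySem.Chars.rfind
      simp only [List.length_nil]
      rw [go_zero, if_neg (by simp [List.isPrefixOf])]
    rw [h0]
    simp [PySem.List.enumerate]
  | append_singleton cs x ih =>
    rw [PySem.List.enumerate_append, List.foldl_append]
    simp only [PySem.List.enumerate_cons, PySem.List.enumerate_nil, List.foldl_cons,
      List.foldl_nil]
    rw [rfind_append_char]
    by_cases hxc : x = c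
    · rw [if_pos hxc, if_neg (by omega)]
      simp [updF, hxc]
    · rw [if_neg hxc]
      have hne : (String.ofList [x] == String.ofList [c]) = false := by
        simp
        intro hh
        exact hxc (by simpa using congrArg String.toList hh)
      simp only [updF, hne, Bool.false_eq_true, if_false]
      exact ih

theorem key_upd (axes : String) (c : Char) :
    (PySem.List.enumerate axes.toList 0).foldl (updF (String.ofList [c])) none
      = axesPosB axes (String.ofList [c]) := by
  rw [upd_rfind]
  simp [axesPosB, PySem.Str.rfind_eq]

theorem axes_eq (axes : String) : axes_pos_extract axes = axes_pos_extract_alt axes := by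
  have kT := key_upd axes 'T'
  have kC := key_upd axes 'C'
  have kZ := key_upd axes 'Z'
  have kY := key_upd axes 'Y'
  have kX := key_upd axes 'X'
  have kS := key_upd axes 'S'
  by_cases hS : PySem.Str.endswith axes "S" = true
  · simp only [axes_pos_extract, axes_pos_extract_alt, hS, if_true]
    have hitems : ((PySem.Dict.ofList [("T", (none : Option Int)), ("C", none), ("Z", none), ("Y", none), ("X", none)]).insert "S" none)
        = PySem.Dict.mk [("T", none), ("C", none), ("Z", none), ("Y", none), ("X", none), ("S", none)] := by rfl
    rw [hitems, foldl_items]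
    simp only [List.map_cons, List.map_nil]
    rw [kT, kC, kZ, kY, kX, kS]
  · simp only [axes_pos_extract, axes_pos_extract_alt, hS, Bool.false_eq_true, if_false]
    have hitems : (PySem.Dict.ofList [("T", (none : Option Int)), ("C", none), ("Z", none), ("Y", none), ("X", none)])
        = PySem.Dict.mk [("T", none), ("C", none), ("Z", none), ("Y", none), ("X", none)] := by rfl
    rw [hitems, foldl_items]
    simp only [List.map_cons, List.map_nil]
    rw [kT, kC, kZ, kY, kX]

-- ===== VERDICT (by name: the statement is the Claim_ definition above) =====
theorem axes_pos_extract_spec : Claim_equal_axes_pos_extract := by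
  intro axes _
  unfold Spec_axes_pos_extract
  exact axes_eq axes
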